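-- pv_equiv track=rewrite | github.com/Tutanka01/Controle_R107_SAE15 | R107_SAE15/main.py | maxelements
-- ===== SOURCE A (Python) =====
-- def maxelements(seq):
--     ''' Return list of position(s) of largest element '''
--     max_indices = []
--     if seq:
--         max_val = seq[0]
--         for i,val in ((i,val) for i,val in enumerate(seq) if val >= max_val):
--             if val == max_val:
--                 max_indices.append(i)
--             else:
--                 max_val = val
--                 max_indices = [i]
--
--     return max_indices
-- ===== SOURCE B (Python) =====
-- def maxelements(seq):
--     ''' Return list of position(s) of largest element '''
--     if not seq:
--         return []
--     m = max(seq)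
--     return [i for i, v in enumerate(seq) if v == m]
-- ===== Notes on version B (the rewrite author's own statement) =====
-- stated objective: simpler
-- what changed: Replaced A's single running-max scan that rebuilds the index list on each new maximum with a two-pass decomposition: compute max(seq) once, then collect the indices equal to it with a comprehension.
import Mathlib
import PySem

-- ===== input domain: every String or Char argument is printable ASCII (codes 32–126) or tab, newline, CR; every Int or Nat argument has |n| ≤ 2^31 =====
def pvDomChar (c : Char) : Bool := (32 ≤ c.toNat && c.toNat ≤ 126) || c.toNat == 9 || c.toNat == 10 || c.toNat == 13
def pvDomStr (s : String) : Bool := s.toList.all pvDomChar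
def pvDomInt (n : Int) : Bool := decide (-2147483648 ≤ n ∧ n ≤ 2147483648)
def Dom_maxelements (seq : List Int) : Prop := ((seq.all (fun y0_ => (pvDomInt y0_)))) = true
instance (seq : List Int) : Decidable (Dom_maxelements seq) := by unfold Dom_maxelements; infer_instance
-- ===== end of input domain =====

-- B replaces A's single running-max scan by a two-pass find-max-then-collect decomposition (simpler; same cost).

-- ===== PORT A =====
-- A's for-loop over the filtering generator: state = (max_val, max_indices); the
-- generator's 'val >= max_val' reads the CURRENT max_val, so it is the outer 'if'.
def pvLoopA : List (Int × Int) → Int → List Int → List Int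
  | [], _, acc => acc
  | (i, v) :: rest, m, acc =>
    if v ≥ m then
      if v == m then pvLoopA rest m (acc ++ [i])
      else pvLoopA rest v [i]
    else pvLoopA rest m acc

def maxelements (seq : List Int) : List Int :=
  match seq with
  | [] => []
  | x :: _ => pvLoopA (PySem.List.enumerate seq 0) x []

-- ===== PORT B =====
def maxelements_alt (seq : List Int) : List Int :=
  match seq with
  | [] => []
  | x :: t =>
    let m := t.foldl max x   -- max(seq) on the nonempty list
    ((PySem.List.enumerate seq 0).filter (fun p => p.2 == m)).map (·.1)

-- ===== PRECONDITION & SPEC =====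
def Spec_maxelements (seq : List Int) (out : List Int) : Prop := out = maxelements_alt seq
instance (seq : List Int) (out : List Int) : Decidable (Spec_maxelements seq out) := by unfold Spec_maxelements; infer_instance

-- ===== CLAIM (what is proved, stated in full; the proofs are below) =====
def Claim_equal_maxelements : Prop := ∀ (seq : List Int), Dom_maxelements seq → Spec_maxelements seq (maxelements seq)

-- ===== LEMMAS AND PROOFS =====

def pvMx (l : List (Int × Int)) (m : Int) : Int := l.foldl (fun a p => max a p.2) m

def pvCollect (m : Int) (l : List (Int × Int)) : List Int :=
  (l.filter (fun p => p.2 == m)).map (·.1)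

theorem pvMx_le (l : List (Int × Int)) (m : Int) : m ≤ pvMx l m := by
  induction l generalizing m with
  | nil => simp [pvMx]
  | cons p rest ih =>
    calc m ≤ max m p.2 := le_max_left _ _
    _ ≤ pvMx rest (max m p.2) := ih _
    _ = pvMx (p :: rest) m := by simp [pvMx]

theorem pvCollect_cons (M i v : Int) (rest : List (Int × Int)) :
    pvCollect M ((i, v) :: rest) = if v = M then i :: pvCollect M rest else pvCollect M rest := by
  by_cases h : v = M <;> simp [pvCollect, h]

theorem pvLoopA_eq (l : List (Int × Int)) (m : Int) (acc : List Int) :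
    pvLoopA l m acc =
      if pvMx l m = m then acc ++ pvCollect m l else pvCollect (pvMx l m) l := by
  induction l generalizing m acc with
  | nil => simp [pvLoopA, pvMx, pvCollect]
  | cons p rest ih =>
    obtain ⟨i, v⟩ := p
    rw [show pvLoopA ((i, v) :: rest) m acc
        = if v ≥ m then (if v = m then pvLoopA rest m (acc ++ [i]) else pvLoopA rest v [i])
          else pvLoopA rest m acc from by simp [pvLoopA]]
    have hMx : pvMx ((i, v) :: rest) m = pvMx rest (max m v) := by simp [pvMx]
    rcases lt_trichotomy v m with hlt | heq | hgt
    · -- v < m : skip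
      rw [if_neg (by omega), ih, hMx, show max m v = m from by omega]
      have hMm : m ≤ pvMx rest m := pvMx_le rest m
      by_cases h2 : pvMx rest m = m
      · rw [if_pos h2, if_pos h2, pvCollect_cons, if_neg (by omega)]
      · rw [if_neg h2, if_neg h2, pvCollect_cons, if_neg (by omega)]
    · -- v = m : append
      subst heq
      rw [if_pos (le_refl v), if_pos rfl, ih, hMx, show max v v = v from by omega]
      have hMv : v ≤ pvMx rest v := pvMx_le rest v
      by_cases h2 : pvMx rest v = v
      · rw [if_pos h2, if_pos h2, pvCollect_cons, if_pos rfl]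
        simp
      · rw [if_neg h2, if_neg h2, pvCollect_cons, if_neg (by omega)]
    · -- v > m : reset
      rw [if_pos (by omega), if_neg (by omega), ih, hMx, show max m v = v from by omega]
      have hMv : v ≤ pvMx rest v := pvMx_le rest v
      rw [if_neg (show pvMx rest v ≠ m by omega)]
      by_cases h2 : pvMx rest v = v
      · rw [if_pos h2, h2, pvCollect_cons, if_pos rfl]
        rfl
      · rw [if_neg h2, pvCollect_cons, if_neg (by omega)]

theorem pvMx_enumerate (xs : List Int) (s m : Int) :
    pvMx (PySem.List.enumerate xs s) m = xs.foldl max m := by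
  have h := PySem.List.map_snd_enumerate xs s
  calc pvMx (PySem.List.enumerate xs s) m
      = ((PySem.List.enumerate xs s).map (·.2)).foldl max m := by
        rw [List.foldl_map]; rfl
    _ = xs.foldl max m := by rw [h]

-- ===== VERDICT (by name: the statement is the Claim_ definition above) =====
theorem maxelements_spec : Claim_equal_maxelements := by
  intro seq _
  unfold Spec_maxelements
  match seq with
  | [] => rfl
  | x :: t =>
    show pvLoopA (PySem.List.enumerate (x :: t) 0) x [] = _
    rw [pvLoopA_eq, pvMx_enumerate]
    have hfold : (x :: t).foldl max x = t.foldl max x := by simp [List.foldl_cons]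
    rw [hfold]
    by_cases h : t.foldl max x = x
    · simp only [if_pos h, List.nil_append]
      simp [maxelements_alt, pvCollect, h]
    · simp only [if_neg h]
      simp [maxelements_alt, pvCollect]
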